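-- pv_equiv track=rewrite | github.com/enochliu98/RainbowArena | rainbowarena/games/gongzhu/judger.py | judge_dun_winner
-- ===== SOURCE A (Python) =====
-- def judge_dun_winner(dun_cards, dun_color):
--     """
--     当前墩胜利者判断
--     标准：
--     color为dun_color的最大牌
--     A最大，2最小
--     """
--     winner_id = -1  # 赢家id
--     winner_card = -1  # 赢家的牌
--
--     for dun_card in dun_cards:
--         if winner_id == -1:
--             winner_id = dun_card[0]
--             winner_card = dun_card[1]
--         else:
--             if dun_card[1] % 4 == dun_color:
--                 if dun_card[1] // 4 == 0:
--                     winner_id = dun_card[0]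
--                     winner_card = dun_card[1]
--                 else:
--                     if winner_card // 4 != 0 and dun_card[1] // 4 > winner_card // 4:
--                         winner_id = dun_card[0]
--                         winner_card = dun_card[1]
--
--     return winner_id
-- ===== SOURCE B (Python) =====
-- def judge_dun_winner(dun_cards, dun_color):
--     if not dun_cards:
--         return -1
--     aces = [c[0] for c in dun_cards if c[1] % 4 == dun_color and c[1] // 4 == 0]
--     if aces:
--         return aces[-1]
--     winner_id, winner_card = dun_cards[0]
--     if winner_card // 4 == 0:
--         return winner_id
--     for pid, card in dun_cards[1:]:
--         if card % 4 == dun_color and card // 4 > winner_card // 4: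
--             winner_id, winner_card = pid, card
--     return winner_id
-- ===== Notes on version B (the rewrite author's own statement) =====
-- stated objective: alternative
-- what changed: Replaced the single fused scan carrying a -1 sentinel state by two explicit passes: first collect the trump aces (which always take the trick, last one wins) and short-circuit, otherwise run a plain rank-maximum scan seeded with the lead card.
-- outside the precondition, e.g. on judge_dun_winner([(0, 8), (-1, 0), (0, 6)], 0): A returns 0, B returns -1
import Mathlib
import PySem

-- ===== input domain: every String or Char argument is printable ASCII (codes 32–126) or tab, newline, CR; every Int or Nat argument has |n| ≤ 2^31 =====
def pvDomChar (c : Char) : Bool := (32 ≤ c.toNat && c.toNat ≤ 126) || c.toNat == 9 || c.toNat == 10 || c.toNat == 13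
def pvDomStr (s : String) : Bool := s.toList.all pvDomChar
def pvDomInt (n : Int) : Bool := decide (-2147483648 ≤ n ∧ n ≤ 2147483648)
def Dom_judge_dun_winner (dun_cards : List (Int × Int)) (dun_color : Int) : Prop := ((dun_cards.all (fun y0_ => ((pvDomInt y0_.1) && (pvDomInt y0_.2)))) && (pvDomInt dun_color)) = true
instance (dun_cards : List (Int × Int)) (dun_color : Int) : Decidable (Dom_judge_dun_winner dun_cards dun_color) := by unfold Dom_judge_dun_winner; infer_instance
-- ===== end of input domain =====

-- B re-decomposes A's fused sentinel-carrying scan into an ace-short-circuit pass plus a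
-- rank-maximum pass (objective: alternative decomposition, same O(n) cost).

-- ===== PORT A =====
-- A's loop body, state = (winner_id, winner_card)
def stepA (dun_color : Int) (s : Int × Int) (dc : Int × Int) : Int × Int :=
  if s.1 = -1 then dc
  else if PySem.Int.mod dc.2 4 = dun_color then
    if PySem.Int.floordiv dc.2 4 = 0 then dc
    else if PySem.Int.floordiv s.2 4 ≠ 0 ∧ PySem.Int.floordiv s.2 4 < PySem.Int.floordiv dc.2 4 then dc
    else s
  else s

def judge_dun_winner (dun_cards : List (Int × Int)) (dun_color : Int) : Int :=
  (dun_cards.foldl (stepA dun_color) (-1, -1)).1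

-- ===== PORT B =====
-- an eligible ace: color matches dun_color and rank (card // 4) is 0
def eligAce (dun_color : Int) (c : Int × Int) : Bool :=
  PySem.Int.mod c.2 4 == dun_color && PySem.Int.floordiv c.2 4 == 0

-- B's rank-maximum loop body
def stepB (dun_color : Int) (s c : Int × Int) : Int × Int :=
  if PySem.Int.mod c.2 4 == dun_color && PySem.Int.floordiv s.2 4 < PySem.Int.floordiv c.2 4 then c
  else s

def judge_dun_winner_alt (dun_cards : List (Int × Int)) (dun_color : Int) : Int :=
  match dun_cards with
  | [] => -1
  | (w0, c0) :: rest =>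
    match ((dun_cards.filter (eligAce dun_color)).map Prod.fst).getLast? with
    | some pid => pid
    | none =>
      if PySem.Int.floordiv c0 4 = 0 then w0
      else (rest.foldl (stepB dun_color) (w0, c0)).1

-- ===== PRECONDITION & SPEC =====
-- Pre_ excludes lists containing the player id -1: A reuses -1 as its "no winner yet" sentinel
-- state, so a card whose player id is -1 makes A restart the scan at the next card — a
-- defensible-corner artefact of the sentinel (real player ids are seat numbers 0..3).
def Pre_judge_dun_winner (dun_cards : List (Int × Int)) (dun_color : Int) : Prop :=
  ∀ c ∈ dun_cards, c.1 ≠ -1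

instance (dun_cards : List (Int × Int)) (dun_color : Int) : Decidable (Pre_judge_dun_winner dun_cards dun_color) := by
  unfold Pre_judge_dun_winner; infer_instance

def pvWitness_judge_dun_winner : (List (Int × Int)) × Int := ([(0, 8), (1, 0), (2, 6)], 0)

def Spec_judge_dun_winner (dun_cards : List (Int × Int)) (dun_color : Int) (out : Int) : Prop := out = judge_dun_winner_alt dun_cards dun_color
instance (dun_cards : List (Int × Int)) (dun_color : Int) (out : Int) : Decidable (Spec_judge_dun_winner dun_cards dun_color out) := by unfold Spec_judge_dun_winner; infer_instance

-- ===== CLAIM (what is proved, stated in full; the proofs are below) =====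
def Claim_equal_judge_dun_winner : Prop := ∀ (dun_cards : List (Int × Int)) (dun_color : Int), Dom_judge_dun_winner dun_cards dun_color → Pre_judge_dun_winner dun_cards dun_color → Spec_judge_dun_winner dun_cards dun_color (judge_dun_winner dun_cards dun_color)

-- ===== LEMMAS AND PROOFS =====

-- once the state holds a rank-0 card and no eligible ace remains, A's loop is frozen
lemma frozen (dun_color : Int) (l : List (Int × Int)) (s : Int × Int)
    (hs : s.1 ≠ -1) (hr : s.2 / 4 = 0)
    (hna : l.filter (eligAce dun_color) = []) :
    l.foldl (stepA dun_color) s = s := by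
  induction l with
  | nil => rfl
  | cons h t ih =>
    simp only [List.filter_cons] at hna
    have he : eligAce dun_color h = false := by
      cases hhe : eligAce dun_color h
      · rfl
      · simp [hhe] at hna
    have hna' : t.filter (eligAce dun_color) = [] := by simpa [he] using hna
    have he' : ¬ (h.2 % 4 = dun_color ∧ h.2 / 4 = 0) := by
      simpa [eligAce] using he
    have hstep : stepA dun_color s h = s := by
      by_cases hm : h.2 % 4 = dun_color
      · have hf : ¬ h.2 / 4 = 0 := fun hf0 => he' ⟨hm, hf0⟩
        simp [stepA, hs, hm, hf, hr]
      · simp [stepA, hs, hm]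
    rw [List.foldl_cons, hstep]
    exact ih hna'

-- if the list still contains an eligible ace, A's loop ends exactly on the last of them
lemma lastAce (dun_color : Int) (l : List (Int × Int)) (s : Int × Int) (a : Int × Int)
    (hs : s.1 ≠ -1) (hl : ∀ c ∈ l, c.1 ≠ -1)
    (hla : (l.filter (eligAce dun_color)).getLast? = some a) :
    l.foldl (stepA dun_color) s = a := by
  induction l generalizing s with
  | nil => simp at hla
  | cons h t ih =>
    have hh : h.1 ≠ -1 := hl h (by simp)
    have ht : ∀ c ∈ t, c.1 ≠ -1 := fun c hc => hl c (by simp [hc])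
    simp only [List.filter_cons] at hla
    by_cases he : eligAce dun_color h = true
    · have he' : h.2 % 4 = dun_color ∧ h.2 / 4 = 0 := by simpa [eligAce] using he
      have hstep : stepA dun_color s h = h := by
        by_cases h1 : s.1 = -1
        · simp [stepA, h1]
        · simp [stepA, h1, he'.1, he'.2]
      rw [List.foldl_cons, hstep]
      rw [if_pos he] at hla
      rcases hft : t.filter (eligAce dun_color) with _ | ⟨x, xs⟩
      · rw [hft] at hla
        simp at hla
        subst hla
        exact frozen dun_color t h hh he'.2 hft
      · rw [hft] at hla
        rw [List.getLast?_cons_cons] at hla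
        rw [← hft] at hla
        exact ih h hh ht hla
    · rw [if_neg he] at hla
      have hstep1 : (stepA dun_color s h).1 ≠ -1 := by
        unfold stepA
        split_ifs <;> simp [hh, hs]
      exact ih _ hstep1 ht hla

-- with no eligible ace left and a non-rank-0 winner, A's loop body coincides with B's
lemma noAce (dun_color : Int) (l : List (Int × Int)) (s : Int × Int)
    (hs : s.1 ≠ -1) (hr : s.2 / 4 ≠ 0) (hl : ∀ c ∈ l, c.1 ≠ -1)
    (hna : l.filter (eligAce dun_color) = []) :
    l.foldl (stepA dun_color) s = l.foldl (stepB dun_color) s := by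
  induction l generalizing s with
  | nil => rfl
  | cons h t ih =>
    have hh : h.1 ≠ -1 := hl h (by simp)
    have ht : ∀ c ∈ t, c.1 ≠ -1 := fun c hc => hl c (by simp [hc])
    simp only [List.filter_cons] at hna
    have he : eligAce dun_color h = false := by
      cases hhe : eligAce dun_color h
      · rfl
      · simp [hhe] at hna
    have hna' : t.filter (eligAce dun_color) = [] := by simpa [he] using hna
    have he' : ¬ (h.2 % 4 = dun_color ∧ h.2 / 4 = 0) := by simpa [eligAce] using he
    by_cases hm : h.2 % 4 = dun_color
    · have hf : ¬ h.2 / 4 = 0 := fun hf0 => he' ⟨hm, hf0⟩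
      by_cases hgt : s.2 / 4 < h.2 / 4
      · have hA : stepA dun_color s h = h := by
          simp [stepA, hs, hm, hf, hr, hgt]
        have hB : stepB dun_color s h = h := by
          simp [stepB, hm, hgt]
        rw [List.foldl_cons, hA, List.foldl_cons, hB]
        exact ih h hh hf ht hna'
      · have hA : stepA dun_color s h = s := by
          simp [stepA, hs, hm, hf, hgt]
        have hB : stepB dun_color s h = s := by
          simp [stepB, hm, hgt]
        rw [List.foldl_cons, hA, List.foldl_cons, hB]
        exact ih s hs hr ht hna'
    · have hA : stepA dun_color s h = s := by
        simp [stepA, hs, hm]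
      have hB : stepB dun_color s h = s := by
        simp [stepB, hm]
      rw [List.foldl_cons, hA, List.foldl_cons, hB]
      exact ih s hs hr ht hna'

-- ===== VERDICT (by name: the statement is the Claim_ definition above) =====
theorem judge_dun_winner_spec : Claim_equal_judge_dun_winner := by
  intro dun_cards dun_color _ hpre
  unfold Spec_judge_dun_winner
  cases dun_cards with
  | nil => rfl
  | cons hd rest =>
    obtain ⟨w0, c0⟩ := hd
    have hh : ((w0, c0) : Int × Int).1 ≠ -1 := hpre _ (by simp)
    have hrest : ∀ c ∈ rest, c.1 ≠ -1 := fun c hc => hpre c (by simp [hc])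
    have hA0 : judge_dun_winner ((w0, c0) :: rest) dun_color
        = (rest.foldl (stepA dun_color) (w0, c0)).1 := by
      have : stepA dun_color (-1, -1) (w0, c0) = (w0, c0) := by simp [stepA]
      simp [judge_dun_winner, this]
    rw [hA0]
    by_cases he : eligAce dun_color ((w0, c0) : Int × Int) = true
    · have he' : c0 % 4 = dun_color ∧ c0 / 4 = 0 := by simpa [eligAce] using he
      rcases hft : rest.filter (eligAce dun_color) with _ | ⟨x, xs⟩
      · have hfold : rest.foldl (stepA dun_color) (w0, c0) = (w0, c0) :=
          frozen dun_color rest (w0, c0) hh he'.2 hft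
        simp [judge_dun_winner_alt, he, hft, hfold]
      · have hla : (rest.filter (eligAce dun_color)).getLast? = some ((x :: xs).getLast (by simp)) := by
          rw [hft]; simp [List.getLast?_eq_some_getLast]
        have hfold := lastAce dun_color rest (w0, c0) _ hh hrest hla
        rw [hfold]
        simp [judge_dun_winner_alt, he, hft, List.getLast?_eq_some_getLast]
        have hgm := List.getLast_map (f := Prod.fst) (l := x :: xs) (by simp)
        simpa using hgm.symm
    · rcases hft : rest.filter (eligAce dun_color) with _ | ⟨x, xs⟩
      · by_cases hr0 : c0 / 4 = 0
        · have hfold : rest.foldl (stepA dun_color) (w0, c0) = (w0, c0) :=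
            frozen dun_color rest (w0, c0) hh hr0 hft
          simp [judge_dun_winner_alt, he, hft, hfold, hr0]
        · have hfold := noAce dun_color rest (w0, c0) hh hr0 hrest hft
          rw [hfold]
          simp [judge_dun_winner_alt, he, hft, hr0]
      · have hla : (rest.filter (eligAce dun_color)).getLast? = some ((x :: xs).getLast (by simp)) := by
          rw [hft]; simp [List.getLast?_eq_some_getLast]
        have hfold := lastAce dun_color rest (w0, c0) _ hh hrest hla
        rw [hfold]
        simp [judge_dun_winner_alt, he, hft, List.getLast?_eq_some_getLast]
        have hgm := List.getLast_map (f := Prod.fst) (l := x :: xs) (by simp)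
        simpa using hgm.symm
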